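-- pv_equiv track=rewrite | github.com/Aditya-sairam/trail-link | tests/evaluation_1/run_eval.py | infer_condition
-- ===== SOURCE A (Python) =====
-- BREAST_CANCER_CODES = {
--     "254837009", "372137005", "413448000", "188161004", "276796008",
--     "408643008", "722524005", "396752002", "427685000", "353431000",
-- }
--
-- BREAST_CANCER_KEYWORDS = [
--     "breast cancer", "breast carcinoma", "breast neoplasm",
--     "malignant neoplasm of breast", "her2", "estrogen receptor",
--     "triple negative", "dcis", "ductal carcinoma",
-- ]
--
-- DIABETES_CODES = {
--     "44054006", "73211009", "359642000", "314771006",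
--     "9859006",  "190331003", "408540003", "420868002",
-- }
--
-- DIABETES_KEYWORDS = [
--     "diabetes mellitus type 2", "type 2 diabetes", "t2dm",
--     "diabetes mellitus", "prediabetes", "prediabetic",
--     "hyperglycemia", "insulin resistance", "metabolic syndrome",
-- ]
--
-- def infer_condition(patient_data: dict) -> str:
--     """
--     Infer patient condition from their conditions list.
--     Returns: 'breast_cancer' | 'diabetes' | 'other'
--     Priority: breast_cancer > diabetes > other
--     """
--     conditions = patient_data.get("conditions", [])
--
--     for cond in conditions:
--         code    = str(cond.get("code", "")).strip()
--         display = str(cond.get("display_name", "")).lower()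
--         if code in BREAST_CANCER_CODES:
--             return "breast_cancer"
--         if any(kw in display for kw in BREAST_CANCER_KEYWORDS):
--             return "breast_cancer"
--
--     for cond in conditions:
--         code    = str(cond.get("code", "")).strip()
--         display = str(cond.get("display_name", "")).lower()
--         if code in DIABETES_CODES:
--             return "diabetes"
--         if any(kw in display for kw in DIABETES_KEYWORDS):
--             return "diabetes"
--
--     return "other"
-- ===== SOURCE B (Python) =====
-- BREAST_CANCER_CODES = {
--     "254837009", "372137005", "413448000", "188161004", "276796008",
--     "408643008", "722524005", "396752002", "427685000", "353431000",
-- }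
--
-- BREAST_CANCER_KEYWORDS = [
--     "breast cancer", "breast carcinoma", "breast neoplasm",
--     "malignant neoplasm of breast", "her2", "estrogen receptor",
--     "triple negative", "dcis", "ductal carcinoma",
-- ]
--
-- DIABETES_CODES = {
--     "44054006", "73211009", "359642000", "314771006",
--     "9859006",  "190331003", "408540003", "420868002",
-- }
--
-- DIABETES_KEYWORDS = [
--     "diabetes mellitus type 2", "type 2 diabetes", "t2dm",
--     "diabetes mellitus", "prediabetes", "prediabetic",
--     "hyperglycemia", "insulin resistance", "metabolic syndrome",
-- ]
--
-- def infer_condition(patient_data: dict) -> str: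
--     """Single pass: return breast_cancer immediately, remember diabetes in a flag."""
--     found_diabetes = False
--     for cond in patient_data.get("conditions", []):
--         code = str(cond.get("code", "")).strip()
--         display = str(cond.get("display_name", "")).lower()
--         if code in BREAST_CANCER_CODES or any(kw in display for kw in BREAST_CANCER_KEYWORDS):
--             return "breast_cancer"
--         found_diabetes = found_diabetes or code in DIABETES_CODES or any(
--             kw in display for kw in DIABETES_KEYWORDS)
--     return "diabetes" if found_diabetes else "other"
-- ===== Notes on version B (the rewrite author's own statement) =====
-- stated objective: simpler
-- what changed: Replaces A's two sequential scans of the conditions list (one for breast cancer, one for diabetes) with a single scan that returns breast_cancer eagerly and tracks diabetes in a flag resolved after the loop.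
import Mathlib
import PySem

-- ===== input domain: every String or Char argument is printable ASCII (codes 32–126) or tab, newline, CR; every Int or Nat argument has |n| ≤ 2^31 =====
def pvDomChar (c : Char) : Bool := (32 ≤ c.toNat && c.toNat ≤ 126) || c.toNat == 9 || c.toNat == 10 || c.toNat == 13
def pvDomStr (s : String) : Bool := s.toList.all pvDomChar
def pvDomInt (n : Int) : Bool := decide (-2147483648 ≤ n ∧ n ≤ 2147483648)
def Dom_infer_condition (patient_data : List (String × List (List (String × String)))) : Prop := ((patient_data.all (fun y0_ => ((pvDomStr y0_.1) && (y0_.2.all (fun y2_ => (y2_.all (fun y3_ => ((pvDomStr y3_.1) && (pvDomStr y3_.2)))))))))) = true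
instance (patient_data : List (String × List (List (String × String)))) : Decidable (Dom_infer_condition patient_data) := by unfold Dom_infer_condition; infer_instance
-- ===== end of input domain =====

-- B merges A's two sequential scans into one pass with a diabetes flag; objective: simpler.

-- shared literal constants of the module
def bcCodes : PySem.Set String := PySem.Set.ofList
  ["254837009", "372137005", "413448000", "188161004", "276796008",
   "408643008", "722524005", "396752002", "427685000", "353431000"]

def bcKeywords : List String :=
  ["breast cancer", "breast carcinoma", "breast neoplasm",
   "malignant neoplasm of breast", "her2", "estrogen receptor",
   "triple negative", "dcis", "ductal carcinoma"]

def dbCodes : PySem.Set String := PySem.Set.ofList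
  ["44054006", "73211009", "359642000", "314771006",
   "9859006",  "190331003", "408540003", "420868002"]

def dbKeywords : List String :=
  ["diabetes mellitus type 2", "type 2 diabetes", "t2dm",
   "diabetes mellitus", "prediabetes", "prediabetic",
   "hyperglycemia", "insulin resistance", "metabolic syndrome"]

-- ===== PORT A =====
-- first loop of A: early return "breast_cancer" as Option
def loopBC : List (List (String × String)) → Option String
  | [] => none
  | cond :: rest =>
    let code := PySem.Str.strip ((PySem.Dict.mk cond).getD "code" "")
    let display := PySem.Str.lower ((PySem.Dict.mk cond).getD "display_name" "")
    if bcCodes.contains code then some "breast_cancer"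
    else if bcKeywords.any (fun kw => PySem.Str.isIn kw display) then some "breast_cancer"
    else loopBC rest

-- second loop of A
def loopDB : List (List (String × String)) → Option String
  | [] => none
  | cond :: rest =>
    let code := PySem.Str.strip ((PySem.Dict.mk cond).getD "code" "")
    let display := PySem.Str.lower ((PySem.Dict.mk cond).getD "display_name" "")
    if dbCodes.contains code then some "diabetes"
    else if dbKeywords.any (fun kw => PySem.Str.isIn kw display) then some "diabetes"
    else loopDB rest

def infer_condition (patient_data : List (String × List (List (String × String)))) : String :=
  let conditions := (PySem.Dict.mk patient_data).getD "conditions" []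
  match loopBC conditions with
  | some s => s
  | none =>
    match loopDB conditions with
    | some s => s
    | none => "other"

-- ===== PORT B =====
-- single pass carrying the found_diabetes flag
def loopOne : List (List (String × String)) → Bool → String
  | [], found => if found then "diabetes" else "other"
  | cond :: rest, found =>
    let code := PySem.Str.strip ((PySem.Dict.mk cond).getD "code" "")
    let display := PySem.Str.lower ((PySem.Dict.mk cond).getD "display_name" "")
    if bcCodes.contains code || bcKeywords.any (fun kw => PySem.Str.isIn kw display) then
      "breast_cancer"
    else
      loopOne rest (found || dbCodes.contains code
        || dbKeywords.any (fun kw => PySem.Str.isIn kw display))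

def infer_condition_alt (patient_data : List (String × List (List (String × String)))) : String :=
  loopOne ((PySem.Dict.mk patient_data).getD "conditions" []) false

-- ===== PRECONDITION & SPEC =====
def Spec_infer_condition (patient_data : List (String × List (List (String × String)))) (out : String) : Prop := out = infer_condition_alt patient_data
instance (patient_data : List (String × List (List (String × String)))) (out : String) : Decidable (Spec_infer_condition patient_data out) := by unfold Spec_infer_condition; infer_instance

-- ===== CLAIM (what is proved, stated in full; the proofs are below) =====
def Claim_equal_infer_condition : Prop := ∀ (patient_data : List (String × List (List (String × String)))), Dom_infer_condition patient_data → Spec_infer_condition patient_data (infer_condition patient_data)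

-- ===== LEMMAS AND PROOFS =====
def isBC (cond : List (String × String)) : Bool :=
  bcCodes.contains (PySem.Str.strip ((PySem.Dict.mk cond).getD "code" ""))
    || bcKeywords.any (fun kw =>
        PySem.Str.isIn kw (PySem.Str.lower ((PySem.Dict.mk cond).getD "display_name" "")))

def isDB (cond : List (String × String)) : Bool :=
  dbCodes.contains (PySem.Str.strip ((PySem.Dict.mk cond).getD "code" ""))
    || dbKeywords.any (fun kw =>
        PySem.Str.isIn kw (PySem.Str.lower ((PySem.Dict.mk cond).getD "display_name" "")))

theorem pvIteOr3 {A : Type} (a b r : Bool) (x y : A) :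
    (if a then x else if b then x else if r then x else y)
      = if (a || b) || r then x else y := by
  cases a <;> cases b <;> cases r <;> rfl

theorem pvOneStep {A : Type} (a b d e rb rd f : Bool) (x y z : A) :
    (if a || b then x else if rb then x else if ((f || d) || e) || rd then y else z)
      = if (a || b) || rb then x else if f || ((d || e) || rd) then y else z := by
  cases a <;> cases b <;> cases d <;> cases e <;> cases rb <;> cases rd <;> cases f <;> rfl

theorem loopBC_eq (l : List (List (String × String))) :
    loopBC l = if l.any isBC then some "breast_cancer" else none := by
  induction l with
  | nil => rfl
  | cons c rest ih =>
    simp only [loopBC, ih, List.any_cons, isBC]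
    exact pvIteOr3 _ _ _ _ _

theorem loopDB_eq (l : List (List (String × String))) :
    loopDB l = if l.any isDB then some "diabetes" else none := by
  induction l with
  | nil => rfl
  | cons c rest ih =>
    simp only [loopDB, ih, List.any_cons, isDB]
    exact pvIteOr3 _ _ _ _ _

theorem loopOne_eq (l : List (List (String × String))) (f : Bool) :
    loopOne l f = if l.any isBC then "breast_cancer"
      else if f || l.any isDB then "diabetes" else "other" := by
  induction l generalizing f with
  | nil => cases f <;> rfl
  | cons c rest ih =>
    simp only [loopOne, ih, List.any_cons, isBC, isDB]
    exact pvOneStep _ _ _ _ _ _ _ _ _ _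

-- ===== VERDICT (by name: the statement is the Claim_ definition above) =====
theorem infer_condition_spec : Claim_equal_infer_condition := by
  intro pd _
  unfold Spec_infer_condition
  simp only [infer_condition, infer_condition_alt, loopBC_eq, loopDB_eq, loopOne_eq]
  cases hRB : (((PySem.Dict.mk pd).getD "conditions" []).any isBC) <;>
  cases hRD : (((PySem.Dict.mk pd).getD "conditions" []).any isDB) <;>
  simp only [hRB, hRD, Bool.false_or, if_true, if_false, Bool.false_eq_true,
    Bool.true_eq_false, ite_true, ite_false]
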